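-- pv_equiv track=rewrite | github.com/nichenxingmeng/Code | 蓝桥杯/高精度/___矩阵翻硬币.py | dashu_sqrt
-- ===== SOURCE A (Python) =====
-- def dashuchengfa(s1, s2):
--     num = [0 for _ in range(500)]
--     for i in range(len(s1)):
--         for j in range(len(s2)):
--             num[i+j+1] += int(s1[i])*int(s2[j])
--     for i in range(len(s1)+len(s2)-1, 0, -1):
--         if num[i] >= 10:
--             num[i-1] += num[i]//10
--             num[i] %= 10
--     ans = ''
--     if num[0] != 0:
--         ans += str(num[0])
--     for i in range(1, len(s1)+len(s2)):
--         ans += str(num[i])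
--     return ans
--
-- def bijiao(s1, s2, pos):
--     if len(s1) + pos != len(s2):
--         return len(s1) + pos > len(s2)
--     else:
--         return s1 > s2
--
-- def dashu_sqrt(s):
--     ans = []
--     if len(s)&1:
--         len_ = len(s)//2+1
--     else:
--         len_ = len(s)//2
--     for i in range(len_):
--         ans.append(0)
--         for j in range(10):
--             if bijiao(dashuchengfa(ans, ans), s, 2*(len_-1-i)):
--                 break
--             ans[i] += 1
--         ans[i] -= 1
--     return ans
-- ===== SOURCE B (Python) =====
-- # Incremental digit-by-digit extraction: the square's raw coefficient list is
-- # maintained across positions and patched per trial digit (O(L) per trial)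
-- # instead of re-running the full O(L^2) schoolbook multiplication each time.
--
-- def _sq_str(cells):
--     # decimal string of the coefficient list, built back-to-front with a
--     # running carry (carry only fires on cells >= 10, matching base-10 norm.)
--     out = []
--     carry = 0
--     for c in reversed(cells[1:]):
--         t = c + carry
--         if t >= 10:
--             carry = t // 10
--             out.append(str(t % 10))
--         else:
--             carry = 0
--             out.append(str(t))
--     out.reverse()
--     head = cells[0] + carry
--     return (str(head) if head != 0 else '') + ''.join(out)
--
-- def _too_big(cells, s, pos):
--     q = _sq_str(cells)
--     if len(q) + pos != len(s):
--         return len(q) + pos > len(s)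
--     return q > s
--
-- def _patched(base, ans, d):
--     # coefficients of the square of ans + [d], given base = coeffs of (ans + [0])^2
--     n = len(ans)
--     t = base[:]
--     for idx in range(n):
--         t[idx + n + 1] += 2 * d * ans[idx]
--     t[2 * n + 1] += d * d
--     return t
--
-- def dashu_sqrt(s):
--     L = len(s)
--     m = L // 2 + (L & 1)
--     ans = []
--     cells = []            # raw coefficient list of ans squared (length 2*len(ans))
--     for i in range(m):
--         pos = 2 * (m - 1 - i)
--         base = cells + [0, 0]
--         d = 0
--         while d < 10 and not _too_big(_patched(base, ans, d), s, pos):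
--             d += 1
--         d -= 1
--         cells = _patched(base, ans, d)
--         ans.append(d)
--     return ans
-- ===== Notes on version B (the rewrite author's own statement) =====
-- stated objective: faster
-- what changed: B keeps the square of the candidate root as a running coefficient list that is patched in O(L) per trial digit (cross terms 2*d*ans[i] plus d*d), and prints it with a single right-to-left carry fold, instead of re-running the full O(L^2) schoolbook multiplication into a fresh 500-cell array for every one of the up-to-10 trials per digit.
import Mathlib
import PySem

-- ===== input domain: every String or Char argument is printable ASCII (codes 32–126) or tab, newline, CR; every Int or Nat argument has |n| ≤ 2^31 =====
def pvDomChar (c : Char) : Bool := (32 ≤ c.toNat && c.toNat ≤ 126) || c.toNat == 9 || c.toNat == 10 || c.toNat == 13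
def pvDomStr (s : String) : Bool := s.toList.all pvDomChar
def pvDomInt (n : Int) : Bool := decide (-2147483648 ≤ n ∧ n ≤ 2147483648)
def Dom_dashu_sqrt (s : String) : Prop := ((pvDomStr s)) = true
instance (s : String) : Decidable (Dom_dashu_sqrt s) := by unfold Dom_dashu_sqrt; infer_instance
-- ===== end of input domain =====

-- B keeps the square of the candidate root as a running coefficient list patched per
-- trial digit instead of re-multiplying the whole number for every trial (objective: faster).

-- ===== PORT A =====
-- dashuchengfa(s1, s2): schoolbook multiplication into a fixed 500-cell array
def aMul (s1 s2 : List Int) : List Char :=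
  let num : List Int :=
    (List.range s1.length).foldl (fun num i =>
      (List.range s2.length).foldl (fun num j =>
        num.set (i+j+1) (num.getD (i+j+1) 0 + s1.getD i 0 * s2.getD j 0)) num)
      (List.replicate 500 0)
  let num :=
    (PySem.List.pyRange ((s1.length + s2.length - 1 : Nat) : Int) 0 (-1)).foldl
      (fun num i =>
        if num.getD i.toNat 0 ≥ 10 then
          (num.set (i.toNat-1) (num.getD (i.toNat-1) 0 + PySem.Int.floordiv (num.getD i.toNat 0) 10)).set
            i.toNat (PySem.Int.mod (num.getD i.toNat 0) 10)
        else num) num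
  let ans : List Char := if num.getD 0 0 ≠ 0 then (PySem.Int.toStr (num.getD 0 0)).toList else []
  (List.range' 1 (s1.length + s2.length - 1)).foldl
    (fun acc i => acc ++ (PySem.Int.toStr (num.getD i 0)).toList) ans

def bijiao (s1 s2 : List Char) (pos : Int) : Bool :=
  if (s1.length : Int) + pos ≠ (s2.length : Int) then
    decide ((s1.length : Int) + pos > (s2.length : Int))
  else PySem.Chars.strLt s2 s1

-- for j in range(10): if bijiao(...): break; ans[i] += 1
def aInner (s : List Char) (pos : Int) (i : Nat) : Nat → List Int → List Int
  | 0, ans => ans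
  | fuel+1, ans =>
    if bijiao (aMul ans ans) s pos then ans
    else aInner s pos i fuel (ans.set i (ans.getD i 0 + 1))

def dashu_sqrt (s : String) : List Int :=
  let sl := s.toList
  let len_ : Nat := if sl.length % 2 = 1 then sl.length / 2 + 1 else sl.length / 2
  (List.range len_).foldl (fun ans (i : Nat) =>
    let ans := ans ++ [0]
    let ans := aInner sl (2*((len_ : Int) - 1 - (i : Int))) i 10 ans
    ans.set i (ans.getD i 0 - 1)) []

-- ===== PORT B =====
-- _sq_str: decimal string of a raw coefficient list, right-to-left carry fold
def bSqStr (cells : List Int) : List Char :=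
  let st :=
    ((cells.drop 1).reverse).foldl (fun (p : Int × List (List Char)) c =>
      let t := c + p.1
      if t ≥ 10 then (PySem.Int.floordiv t 10, p.2 ++ [(PySem.Int.toStr (PySem.Int.mod t 10)).toList])
      else (0, p.2 ++ [(PySem.Int.toStr t).toList])) (0, [])
  let head := cells.getD 0 0 + st.1
  (if head ≠ 0 then (PySem.Int.toStr head).toList else []) ++ st.2.reverse.flatten

def bTooBig (cells : List Int) (s : List Char) (pos : Int) : Bool :=
  let q := bSqStr cells
  if (q.length : Int) + pos ≠ (s.length : Int) then
    decide ((q.length : Int) + pos > (s.length : Int))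
  else PySem.Chars.strLt s q

-- _patched: coefficients of (ans + [d])^2 from base = coeffs of (ans + [0])^2
def bPatched (base : List Int) (ans : List Int) (d : Int) : List Int :=
  let n := ans.length
  let t := (List.range n).foldl (fun t idx =>
    t.set (idx+n+1) (t.getD (idx+n+1) 0 + 2*d*ans.getD idx 0)) base
  t.set (2*n+1) (t.getD (2*n+1) 0 + d*d)

-- while d < 10 and not _too_big(...): d += 1
def bFind (s : List Char) (pos : Int) (ans base : List Int) : Nat → Int → Int
  | 0, d => d
  | fuel+1, d =>
    if bTooBig (bPatched base ans d) s pos then d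
    else bFind s pos ans base fuel (d+1)

def dashu_sqrt_alt (s : String) : List Int :=
  let sl := s.toList
  let m : Nat := sl.length / 2 + sl.length % 2
  let st :=
    (List.range m).foldl (fun (st : List Int × List Int) (i : Nat) =>
      let pos : Int := 2*((m : Int) - 1 - (i : Int))
      let base := st.2 ++ [0, 0]
      let d := bFind sl pos st.1 base 10 0 - 1
      (st.1 ++ [d], bPatched base st.1 d)) ([], [])
  st.1

-- ===== PRECONDITION & SPEC =====
-- Pre_ excludes exactly the strings longer than 500 characters, on which A raises
-- IndexError (its multiplication buffer is a fixed 500-cell array); A returns on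
-- every other string.
def Pre_dashu_sqrt (s : String) : Prop := s.toList.length ≤ 500
instance (s : String) : Decidable (Pre_dashu_sqrt s) := by unfold Pre_dashu_sqrt; infer_instance
def pvWitness_dashu_sqrt : String := "1600"
def Spec_dashu_sqrt (s : String) (out : List Int) : Prop := out = dashu_sqrt_alt s
instance (s : String) (out : List Int) : Decidable (Spec_dashu_sqrt s out) := by unfold Spec_dashu_sqrt; infer_instance

-- ===== CLAIM (what is proved, stated in full; the proofs are below) =====
def Claim_equal_dashu_sqrt : Prop := ∀ (s : String), Dom_dashu_sqrt s → Pre_dashu_sqrt s → Spec_dashu_sqrt s (dashu_sqrt s)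

-- ===== LEMMAS AND PROOFS =====

-- cell k of the schoolbook product of a and b (coefficient before base-10 carrying)
def S2 (a b : List Int) (k : Nat) : Int :=
  ((List.range a.length).map (fun i =>
    ((List.range b.length).map (fun j =>
      if i+j+1 = k then a.getD i 0 * b.getD j 0 else 0)).sum)).sum

-- the raw coefficient list of a*a, as B maintains it
def cellsSpec (a : List Int) : List Int := (List.range (2*a.length)).map (fun k => S2 a a k)

-- right-to-left base-10 carry (only on cells >= 10): final carry and the digit cells
def normDigits : List Int → Int × List Int
  | [] => (0, [])
  | c :: cs =>
    let r := normDigits cs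
    let t := c + r.1
    if t ≥ 10 then (PySem.Int.floordiv t 10, PySem.Int.mod t 10 :: r.2) else (0, t :: r.2)

-- the decimal string both sides print for a coefficient tail cs (head cell is 0)
def sqRepr (cs : List Int) : List Char :=
  let r := normDigits cs
  (if r.1 ≠ 0 then (PySem.Int.toStr r.1).toList else []) ++
    (r.2.map (fun d => (PySem.Int.toStr d).toList)).flatten

-- the loop bodies of the two outer folds, named for the induction
def stepA (s : List Char) (m : Nat) : List Int → Nat → List Int :=
  fun ans i =>
    let ans := ans ++ [0]
    let ans := aInner s (2*((m : Int) - 1 - (i : Int))) i 10 ans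
    ans.set i (ans.getD i 0 - 1)

def stepB (s : List Char) (m : Nat) : List Int × List Int → Nat → List Int × List Int :=
  fun st i =>
    let pos : Int := 2*((m : Int) - 1 - (i : Int))
    let base := st.2 ++ [0, 0]
    let d := bFind s pos st.1 base 10 0 - 1
    (st.1 ++ [d], bPatched base st.1 d)

lemma getD_set_ne (l : List Int) (i k : Nat) (x : Int) (h : i ≠ k) :
    (l.set i x).getD k 0 = l.getD k 0 := by
  simp only [List.getD_eq_getElem?_getD]; rw [List.getElem?_set_ne h]

lemma getD_set_self (l : List Int) (i : Nat) (x : Int) (h : i < l.length) :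
    (l.set i x).getD i 0 = x := by
  simp only [List.getD_eq_getElem?_getD]; rw [List.getElem?_set_self h]; rfl

lemma foldl_set_add_length {α : Type} (idx : α → Nat) (v : α → Int) (l : List α) (num : List Int) :
    (l.foldl (fun acc x => acc.set (idx x) (acc.getD (idx x) 0 + v x)) num).length = num.length := by
  induction l generalizing num with
  | nil => rfl
  | cons x l ih => rw [List.foldl_cons, ih, List.length_set]

lemma foldl_set_add {α : Type} (idx : α → Nat) (v : α → Int) (l : List α) (num : List Int) (k : Nat)
    (h : ∀ x ∈ l, idx x < num.length) :
    (l.foldl (fun acc x => acc.set (idx x) (acc.getD (idx x) 0 + v x)) num).getD k 0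
      = num.getD k 0 + (l.map (fun x => if idx x = k then v x else 0)).sum := by
  induction l generalizing num with
  | nil => simp
  | cons x l ih =>
    simp only [List.foldl_cons, List.map_cons, List.sum_cons]
    rw [ih _ (by intro y hy; simpa using h y (List.mem_cons_of_mem _ hy))]
    by_cases hk : idx x = k
    · subst hk
      rw [getD_set_self _ _ _ (h x (by simp))]
      simp
      ring
    · rw [getD_set_ne _ _ _ _ hk]
      simp [hk]

lemma normDigits_len (cs : List Int) : (normDigits cs).2.length = cs.length := by
  induction cs with
  | nil => rfl
  | cons c cs ih => simp only [normDigits]; split <;> simp [ih]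

lemma S2_zero (a b : List Int) : S2 a b 0 = 0 := by
  unfold S2
  apply List.sum_eq_zero
  intro x hx
  simp only [List.mem_map, List.mem_range] at hx
  obtain ⟨i, hi, rfl⟩ := hx
  apply List.sum_eq_zero
  intro y hy
  simp only [List.mem_map, List.mem_range] at hy
  obtain ⟨j, hj, rfl⟩ := hy
  rw [if_neg (by omega)]

lemma S2_eq_zero_of_ge (a b : List Int) (k : Nat) (h : a.length + b.length ≤ k) :
    S2 a b k = 0 := by
  unfold S2
  apply List.sum_eq_zero
  intro x hx
  simp only [List.mem_map, List.mem_range] at hx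
  obtain ⟨i, hi, rfl⟩ := hx
  apply List.sum_eq_zero
  intro y hy
  simp only [List.mem_map, List.mem_range] at hy
  obtain ⟨j, hj, rfl⟩ := hy
  rw [if_neg (by omega)]

lemma aConv_len (s1 s2 : List Int) (t : Nat) :
    ((List.range t).foldl (fun num i =>
      (List.range s2.length).foldl (fun num j =>
        num.set (i+j+1) (num.getD (i+j+1) 0 + s1.getD i 0 * s2.getD j 0)) num)
      (List.replicate 500 (0:Int))).length = 500 := by
  induction t with
  | zero => simp only [List.range_zero, List.foldl_nil, List.length_replicate]
  | succ t ih =>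
    rw [List.range_succ, List.foldl_append, List.foldl_cons, List.foldl_nil]
    rw [foldl_set_add_length (fun j => t+j+1) (fun j => s1.getD t 0 * s2.getD j 0)]
    exact ih

lemma getD_replicate_zero (k : Nat) : (List.replicate 500 (0:Int)).getD k 0 = 0 := by
  simp only [List.getD_eq_getElem?_getD, List.getElem?_replicate]
  split <;> rfl

lemma aConv_getD (s1 s2 : List Int) (h : s1.length + s2.length ≤ 500) (k : Nat) :
    ((List.range s1.length).foldl (fun num i =>
      (List.range s2.length).foldl (fun num j =>
        num.set (i+j+1) (num.getD (i+j+1) 0 + s1.getD i 0 * s2.getD j 0)) num)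
      (List.replicate 500 (0:Int))).getD k 0 = S2 s1 s2 k := by
  suffices H : ∀ t, t ≤ s1.length → ((List.range t).foldl (fun num i =>
      (List.range s2.length).foldl (fun num j =>
        num.set (i+j+1) (num.getD (i+j+1) 0 + s1.getD i 0 * s2.getD j 0)) num)
      (List.replicate 500 (0:Int))).getD k 0
      = ((List.range t).map (fun i => ((List.range s2.length).map (fun j =>
          if i+j+1 = k then s1.getD i 0 * s2.getD j 0 else 0)).sum)).sum by
    exact H s1.length le_rfl
  intro t ht
  induction t with
  | zero => simp only [List.range_zero, List.foldl_nil, List.map_nil, List.sum_nil, getD_replicate_zero]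
  | succ t ih =>
    rw [List.range_succ, List.foldl_append, List.foldl_cons, List.foldl_nil,
        List.map_append, List.sum_append]
    rw [foldl_set_add (fun j => t+j+1) (fun j => s1.getD t 0 * s2.getD j 0)]
    · rw [ih (by omega)]
      simp
    · intro j hj
      rw [aConv_len]
      simp only [List.mem_range] at hj
      omega

lemma pyRange_down (M : Nat) :
    PySem.List.pyRange (M : Int) 0 (-1) = ((List.range' 1 M).map Int.ofNat).reverse := by
  unfold PySem.List.pyRange
  rcases Nat.eq_zero_or_pos M with h | h
  · subst h; rfl
  · rw [if_neg (by norm_num), if_neg (by norm_num), if_pos (by exact_mod_cast h)]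
    apply List.ext_getElem
    · simp only [List.length_map, List.length_range, List.length_reverse, List.length_range']
      norm_num
    · intro i h1 h2
      simp only [List.getElem_map, List.getElem_range, List.getElem_reverse]
      simp only [List.length_map, List.length_range'] at h2 ⊢
      rw [List.getElem_range']
      simp only [List.length_map, List.length_range] at h1 ⊢
      norm_num at h1
      simp only [Int.ofNat_eq_natCast]
      omega

lemma carry_fold (cs : List Int) : ∀ (base : Nat) (num : List Int),
    base + 1 + cs.length ≤ num.length →
    (∀ t, t < cs.length → num.getD (base+1+t) 0 = cs.getD t 0) →
    (((List.range' (base+1) cs.length).foldr (fun (i : Nat) acc =>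
        if acc.getD i 0 ≥ 10 then
          (acc.set (i-1) (acc.getD (i-1) 0 + PySem.Int.floordiv (acc.getD i 0) 10)).set
            i (PySem.Int.mod (acc.getD i 0) 10)
        else acc) num).length = num.length) ∧
    (((List.range' (base+1) cs.length).foldr (fun (i : Nat) acc =>
        if acc.getD i 0 ≥ 10 then
          (acc.set (i-1) (acc.getD (i-1) 0 + PySem.Int.floordiv (acc.getD i 0) 10)).set
            i (PySem.Int.mod (acc.getD i 0) 10)
        else acc) num).getD base 0 = num.getD base 0 + (normDigits cs).1) ∧
    (∀ t, t < cs.length → ((List.range' (base+1) cs.length).foldr (fun (i : Nat) acc =>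
        if acc.getD i 0 ≥ 10 then
          (acc.set (i-1) (acc.getD (i-1) 0 + PySem.Int.floordiv (acc.getD i 0) 10)).set
            i (PySem.Int.mod (acc.getD i 0) 10)
        else acc) num).getD (base+1+t) 0 = (normDigits cs).2.getD t 0) ∧
    (∀ k, k < base → ((List.range' (base+1) cs.length).foldr (fun (i : Nat) acc =>
        if acc.getD i 0 ≥ 10 then
          (acc.set (i-1) (acc.getD (i-1) 0 + PySem.Int.floordiv (acc.getD i 0) 10)).set
            i (PySem.Int.mod (acc.getD i 0) 10)
        else acc) num).getD k 0 = num.getD k 0) := by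
  induction cs with
  | nil =>
    intro base num _ _
    simp [normDigits]
  | cons c cs ih =>
    intro base num hlen hseg
    rw [List.length_cons] at hlen
    have hrange : List.range' (base+1) (c :: cs).length = (base+1) :: List.range' (base+2) cs.length := by
      rw [List.length_cons, List.range'_succ]
    rw [hrange]
    simp only [List.foldr_cons]
    have ihspec := ih (base+1) num (by omega) (by
      intro t ht
      have := hseg (t+1) (by simp; omega)
      simpa [Nat.add_assoc, Nat.add_comm, Nat.add_left_comm] using this)
    obtain ⟨ihlen, ihbase, ihseg, ihlow⟩ := ihspec
    set inner := (List.range' (base+2) cs.length).foldr (fun (i : Nat) acc =>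
        if acc.getD i 0 ≥ 10 then
          (acc.set (i-1) (acc.getD (i-1) 0 + PySem.Int.floordiv (acc.getD i 0) 10)).set
            i (PySem.Int.mod (acc.getD i 0) 10)
        else acc) num with hinner
    have hin_b1 : inner.getD (base+1) 0 = c + (normDigits cs).1 := by
      rw [ihbase]
      have := hseg 0 (by simp)
      simpa using this
    have hin_base : inner.getD base 0 = num.getD base 0 := ihlow base (by omega)
    have hbase_lt : base < inner.length := by rw [ihlen]; omega
    have hb1_lt : base + 1 < inner.length := by rw [ihlen]; omega
    simp only [normDigits]
    by_cases hc : c + (normDigits cs).1 ≥ 10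
    · rw [if_pos (by rw [hin_b1]; exact hc), if_pos hc]
      have hm1 : base + 1 - 1 = base := by omega
      rw [hm1]
      refine ⟨by simp [ihlen], ?_, ?_, ?_⟩
      · rw [getD_set_ne _ _ _ _ (by omega),
            getD_set_self _ _ _ hbase_lt, hin_base, hin_b1]
      · intro t ht
        rcases Nat.eq_zero_or_pos t with rfl | htpos
        · rw [Nat.add_zero]
          rw [getD_set_self _ _ _ (by simpa using hb1_lt), hin_b1]
          rfl
        · obtain ⟨s, rfl⟩ := Nat.exists_eq_add_of_lt htpos
          rw [getD_set_ne _ _ _ _ (by omega), getD_set_ne _ _ _ _ (by omega)]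
          have := ihseg s (by simp at ht; omega)
          simp only [List.getD_cons_succ]
          rw [show base + 1 + (0 + s + 1) = base + 1 + 1 + s by omega]
          rw [show (0:Nat) + s = s by omega]
          exact this
      · intro k hk
        rw [getD_set_ne _ _ _ _ (by omega), getD_set_ne _ _ _ _ (by omega)]
        exact ihlow k (by omega)
    · rw [if_neg (by rw [hin_b1]; exact hc), if_neg hc]
      refine ⟨ihlen, by rw [hin_base]; ring, ?_, fun k hk => ihlow k (by omega)⟩
      intro t ht
      rcases Nat.eq_zero_or_pos t with rfl | htpos
      · simpa using hin_b1
      · obtain ⟨s, rfl⟩ := Nat.exists_eq_add_of_lt htpos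
        have := ihseg s (by simp at ht; omega)
        simp only [List.getD_cons_succ]
        rw [show base + 1 + (0 + s + 1) = base + 1 + 1 + s by omega]
        rw [show (0:Nat) + s = s by omega]
        exact this

lemma flatMap_seg (f : Int → List Char) (ds : List Int) : ∀ (base : Nat) (num : List Int),
    (∀ t, t < ds.length → num.getD (base+1+t) 0 = ds.getD t 0) →
    (List.range' (base+1) ds.length).flatMap (fun i => f (num.getD i 0)) = (ds.map f).flatten := by
  induction ds with
  | nil => intro base num _; simp
  | cons d ds ih =>
    intro base num hseg
    rw [List.length_cons, List.range'_succ, List.flatMap_cons, List.map_cons, List.flatten_cons]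
    congr 1
    · have := hseg 0 (by simp)
      simp only [Nat.add_zero, List.getD_cons_zero] at this
      rw [this]
    · have := ih (base+1) num (by
        intro t ht
        have := hseg (t+1) (by simp; omega)
        rw [show base + 1 + 1 + t = base + 1 + (t+1) by omega]
        simpa using this)
      simpa using this

lemma seg_map (f : Nat → Int) (M t : Nat) (ht : t < M) :
    ((List.range' 1 M).map f).getD t 0 = f (1+t) := by
  rw [List.getD_eq_getElem?_getD, List.getElem?_map]
  rw [List.getElem?_range' (by simpa using ht)]
  simp

lemma carry_loop_as_foldr (M : Nat) (num : List Int) :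
    (PySem.List.pyRange (M : Int) 0 (-1)).foldl (fun num i =>
        if num.getD i.toNat 0 ≥ 10 then
          (num.set (i.toNat-1) (num.getD (i.toNat-1) 0 + PySem.Int.floordiv (num.getD i.toNat 0) 10)).set
            i.toNat (PySem.Int.mod (num.getD i.toNat 0) 10)
        else num) num
      = (List.range' 1 M).foldr (fun (i : Nat) acc =>
        if acc.getD i 0 ≥ 10 then
          (acc.set (i-1) (acc.getD (i-1) 0 + PySem.Int.floordiv (acc.getD i 0) 10)).set
            i (PySem.Int.mod (acc.getD i 0) 10)
        else acc) num := by
  rw [pyRange_down, ← List.map_reverse, List.foldl_map, List.foldl_reverse]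
  simp only [Int.ofNat_eq_natCast, Int.toNat_natCast]

-- aMul prints exactly sqRepr of the S2 coefficient tail

lemma aMul_eq (s1 s2 : List Int) (h : s1.length + s2.length ≤ 500) :
    aMul s1 s2 = sqRepr ((List.range' 1 (s1.length + s2.length - 1)).map (fun k => S2 s1 s2 k)) := by
  simp only [aMul]
  set M := s1.length + s2.length - 1 with hM
  set cs : List Int := (List.range' 1 M).map (fun k => S2 s1 s2 k) with hcs
  set A1 := (List.range s1.length).foldl (fun num i =>
      (List.range s2.length).foldl (fun num j =>
        num.set (i+j+1) (num.getD (i+j+1) 0 + s1.getD i 0 * s2.getD j 0)) num)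
      (List.replicate 500 (0:Int)) with hA1
  have hlencs : cs.length = M := by rw [hcs]; simp
  have hA1len : A1.length = 500 := aConv_len s1 s2 s1.length
  have hA1get : ∀ k, A1.getD k 0 = S2 s1 s2 k := fun k => aConv_getD s1 s2 h k
  rw [carry_loop_as_foldr]
  obtain ⟨h1, h2, h3, h4⟩ := carry_fold cs 0 A1
    (by rw [hA1len]; omega)
    (by intro t ht
        rw [hA1get, Nat.zero_add]
        rw [hcs, seg_map _ M t (by rwa [hlencs] at ht)])
  simp only [Nat.zero_add] at h1 h2 h3
  rw [hlencs] at h1 h2 h3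
  set A2 := (List.range' 1 M).foldr (fun (i : Nat) acc =>
        if acc.getD i 0 ≥ 10 then
          (acc.set (i-1) (acc.getD (i-1) 0 + PySem.Int.floordiv (acc.getD i 0) 10)).set
            i (PySem.Int.mod (acc.getD i 0) 10)
        else acc) A1 with hA2
  have hhead : A2.getD 0 0 = (normDigits cs).1 := by
    rw [h2, hA1get, S2_zero, zero_add]
  rw [PySem.List.foldl_append_eq_flatMap]
  have hflat : (List.range' 1 M).flatMap (fun i => (PySem.Int.toStr (A2.getD i 0)).toList)
      = ((normDigits cs).2.map (fun d => (PySem.Int.toStr d).toList)).flatten := by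
    have hds : (normDigits cs).2.length = M := by rw [normDigits_len, hlencs]
    rw [← hds]
    have := flatMap_seg (fun d => (PySem.Int.toStr d).toList) (normDigits cs).2 0 A2 (by
      intro t ht
      rw [Nat.zero_add]
      exact h3 t (by rwa [hds] at ht))
    simpa using this
  rw [hflat, hhead]
  rfl

lemma bFold_eq (cs : List Int) :
    cs.reverse.foldl (fun (p : Int × List (List Char)) c =>
      let t := c + p.1
      if t ≥ 10 then (PySem.Int.floordiv t 10, p.2 ++ [(PySem.Int.toStr (PySem.Int.mod t 10)).toList])
      else (0, p.2 ++ [(PySem.Int.toStr t).toList])) (0, [])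
    = ((normDigits cs).1, ((normDigits cs).2.map (fun d => (PySem.Int.toStr d).toList)).reverse) := by
  rw [List.foldl_reverse]
  induction cs with
  | nil => rfl
  | cons c cs ih =>
    rw [List.foldr_cons, ih]
    simp only [normDigits]
    by_cases hc : c + (normDigits cs).1 ≥ 10
    · rw [if_pos hc, if_pos hc]
      simp
    · rw [if_neg hc, if_neg hc]
      simp

lemma bSqStr_eq (cells : List Int) (h0 : cells.getD 0 0 = 0) :
    bSqStr cells = sqRepr (cells.drop 1) := by
  unfold bSqStr sqRepr
  rw [bFold_eq, h0]
  simp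

lemma cellsSpec_getD (a : List Int) (k : Nat) : (cellsSpec a).getD k 0 = S2 a a k := by
  unfold cellsSpec
  by_cases hk : k < 2*a.length
  · rw [List.getD_eq_getElem?_getD, List.getElem?_map, List.getElem?_range hk]
    rfl
  · rw [List.getD_eq_getElem?_getD, List.getElem?_eq_none (by simp; omega)]
    rw [S2_eq_zero_of_ge a a k (by simp at hk ⊢; omega)]
    rfl

lemma base_getD (p : List Int) (k : Nat) : (cellsSpec p ++ [0,0]).getD k 0 = S2 p p k := by
  have hlen : (cellsSpec p).length = 2*p.length := by simp [cellsSpec]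
  by_cases hk : k < 2*p.length
  · rw [List.getD_eq_getElem?_getD, List.getElem?_append_left (by omega),
        ← List.getD_eq_getElem?_getD, cellsSpec_getD]
  · rw [S2_eq_zero_of_ge p p k (by omega)]
    rw [List.getD_eq_getElem?_getD, List.getElem?_append_right (by omega), hlen]
    rcases h2 : k - 2*p.length with _|_|m <;> simp

lemma S2_snoc (p : List Int) (d : Int) (k : Nat) :
    S2 (p++[d]) (p++[d]) k = S2 p p k
      + ((List.range p.length).map (fun idx => if idx+p.length+1 = k then 2*d*p.getD idx 0 else 0)).sum
      + (if 2*p.length+1 = k then d*d else 0) := by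
  have hlen : (p ++ [d]).length = p.length + 1 := by
    simp only [List.length_append, List.length_cons, List.length_nil]
  have hgetlt : ∀ i, i < p.length → (p ++ [d]).getD i 0 = p.getD i 0 := by
    intro i hi
    simp only [List.getD_eq_getElem?_getD]
    rw [List.getElem?_append_left (by omega)]
  have hgetn : (p ++ [d]).getD p.length 0 = d := by simp
  unfold S2
  rw [hlen, List.range_succ, List.map_append, List.sum_append]
  have e1 : (List.range p.length).map (fun i => (((List.range p.length ++ [p.length])).map (fun j =>
        if i+j+1 = k then (p++[d]).getD i 0 * (p++[d]).getD j 0 else 0)).sum)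
      = (List.range p.length).map (fun i =>
          ((List.range p.length).map (fun j => if i+j+1 = k then p.getD i 0 * p.getD j 0 else 0)).sum
          + (if i+p.length+1 = k then p.getD i 0 * d else 0)) := by
    apply List.map_congr_left
    intro i hi
    simp only [List.mem_range] at hi
    rw [List.map_append, List.sum_append]
    simp only [List.map_cons, List.map_nil, List.sum_cons, List.sum_nil, add_zero]
    rw [hgetn, hgetlt i hi]
    congr 1
    apply congrArg
    apply List.map_congr_left
    intro j hj
    simp only [List.mem_range] at hj
    rw [hgetlt j hj]
  rw [e1]
  simp only [List.map_cons, List.map_nil, List.sum_cons, List.sum_nil, add_zero]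
  have e2 : (((List.range p.length ++ [p.length])).map (fun j =>
        if p.length+j+1 = k then (p++[d]).getD p.length 0 * (p++[d]).getD j 0 else 0)).sum
      = ((List.range p.length).map (fun j => if p.length+j+1 = k then d * p.getD j 0 else 0)).sum
        + (if 2*p.length+1 = k then d*d else 0) := by
    rw [List.map_append, List.sum_append]
    simp only [List.map_cons, List.map_nil, List.sum_cons, List.sum_nil, add_zero]
    rw [hgetn]
    congr 1
    · apply congrArg
      apply List.map_congr_left
      intro j hj
      simp only [List.mem_range] at hj
      rw [hgetlt j hj]
    · rw [show p.length+p.length+1 = 2*p.length+1 by omega]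
  rw [e2]
  rw [PySem.List.sum_map_add_int]
  have hcross : ((List.range p.length).map (fun i => if i+p.length+1 = k then p.getD i 0 * d else 0)).sum
      + ((List.range p.length).map (fun j => if p.length+j+1 = k then d * p.getD j 0 else 0)).sum
      = ((List.range p.length).map (fun idx => if idx+p.length+1 = k then 2*d*p.getD idx 0 else 0)).sum := by
    rw [← PySem.List.sum_map_add_int]
    apply congrArg
    apply List.map_congr_left
    intro i hi
    by_cases hik : i+p.length+1 = k
    · rw [if_pos hik, if_pos (by omega), if_pos hik]
      ring
    · rw [if_neg hik, if_neg (by omega), if_neg hik]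
      ring
  rw [← hcross]
  ring

lemma bPatched_cells (p : List Int) (d : Int) :
    bPatched (cellsSpec p ++ [0,0]) p d = cellsSpec (p ++ [d]) := by
  unfold bPatched
  have hbaselen : (cellsSpec p ++ [0,0]).length = 2*p.length+2 := by
    simp [cellsSpec]
  set inter := (List.range p.length).foldl (fun t idx =>
    t.set (idx+p.length+1) (t.getD (idx+p.length+1) 0 + 2*d*p.getD idx 0)) (cellsSpec p ++ [0,0]) with hinter
  have hinterlen : inter.length = 2*p.length+2 := by
    rw [hinter, foldl_set_add_length (fun idx => idx+p.length+1) (fun idx => 2*d*p.getD idx 0), hbaselen]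
  have hinterget : ∀ k, inter.getD k 0 = S2 p p k
      + ((List.range p.length).map (fun idx => if idx+p.length+1 = k then 2*d*p.getD idx 0 else 0)).sum := by
    intro k
    rw [hinter, foldl_set_add (fun idx => idx+p.length+1) (fun idx => 2*d*p.getD idx 0) _ _ _
        (by intro x hx
            simp only [List.mem_range] at hx
            show x + p.length + 1 < (cellsSpec p ++ [0,0]).length
            rw [hbaselen]; omega)]
    rw [base_getD]
  have lhs_getD : ∀ k, (inter.set (2*p.length+1) (inter.getD (2*p.length+1) 0 + d*d)).getD k 0
      = S2 (p++[d]) (p++[d]) k := by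
    intro k
    rw [S2_snoc]
    by_cases hk' : k = 2*p.length+1
    · subst hk'
      rw [getD_set_self _ _ _ (by omega), hinterget]
      rw [if_pos rfl]
    · rw [getD_set_ne _ _ _ _ (by omega), hinterget, if_neg (by omega)]
      ring
  apply List.ext_getElem
  · rw [List.length_set, hinterlen]
    simp only [cellsSpec, List.length_map, List.length_range, List.length_append,
      List.length_cons, List.length_nil]
    omega
  · intro k hk1 hk2
    rw [← List.getD_eq_getElem _ 0 hk1, ← List.getD_eq_getElem _ 0 hk2]
    rw [lhs_getD k, cellsSpec_getD]

lemma trial_eq (p : List Int) (x : Int) (h : 2*(p.length+1) ≤ 500) :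
    aMul (p ++ [x]) (p ++ [x]) = bSqStr (bPatched (cellsSpec p ++ [0,0]) p x) := by
  rw [bPatched_cells]
  have h0 : (cellsSpec (p++[x])).getD 0 0 = 0 := by rw [cellsSpec_getD, S2_zero]
  rw [bSqStr_eq _ h0]
  rw [aMul_eq _ _ (by simp only [List.length_append, List.length_cons, List.length_nil]; omega)]
  congr 1
  unfold cellsSpec
  rw [List.range_eq_range']
  have h2 : 2 * (p ++ [x]).length = ((p ++ [x]).length + (p ++ [x]).length - 1) + 1 := by
    simp only [List.length_append, List.length_cons, List.length_nil]; omega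
  rw [h2, List.range'_succ, List.map_cons, List.drop_one, List.tail_cons]

lemma cond_eq (cells : List Int) (s : List Char) (pos : Int) :
    bijiao (bSqStr cells) s pos = bTooBig cells s pos := rfl

lemma inner_eq (s : List Char) (pos : Int) (p : List Int) (h : 2*(p.length+1) ≤ 500) :
    ∀ (fuel : Nat) (v : Int),
      aInner s pos p.length fuel (p ++ [v])
        = p ++ [bFind s pos p (cellsSpec p ++ [0,0]) fuel v] := by
  intro fuel
  induction fuel with
  | zero => intro v; rfl
  | succ fuel ih =>
    intro v
    rw [aInner, bFind]
    rw [trial_eq p v h, cond_eq]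
    by_cases hb : bTooBig (bPatched (cellsSpec p ++ [0,0]) p v) s pos
    · rw [if_pos hb, if_pos hb]
    · rw [if_neg hb, if_neg hb]
      have hset : (p ++ [v]).set p.length ((p ++ [v]).getD p.length 0 + 1) = p ++ [v+1] := by
        rw [List.set_append]
        simp
      rw [hset, ih (v+1)]

lemma outer_eq (s : List Char) (m : Nat) (hm : 2*m ≤ 500) : ∀ (t : Nat), t ≤ m →
    ((List.range t).foldl (stepA s m) [] = ((List.range t).foldl (stepB s m) ([], [])).1) ∧
    (((List.range t).foldl (stepB s m) ([], [])).2
        = cellsSpec (((List.range t).foldl (stepB s m) ([], [])).1)) ∧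
    ((((List.range t).foldl (stepB s m) ([], [])).1).length = t) := by
  intro t
  induction t with
  | zero => intro _; refine ⟨rfl, rfl, rfl⟩
  | succ t ih =>
    intro ht
    obtain ⟨ih1, ih2, ih3⟩ := ih (by omega)
    rw [List.range_succ, List.foldl_append, List.foldl_cons, List.foldl_nil,
        List.foldl_append, List.foldl_cons, List.foldl_nil]
    set pB := ((List.range t).foldl (stepB s m) ([], [])).1 with hpB
    set cB := ((List.range t).foldl (stepB s m) ([], [])).2 with hcB
    have hstepB : stepB s m (pB, cB) t
        = (pB ++ [bFind s (2*((m : Int) - 1 - (t : Int))) pB (cB ++ [0,0]) 10 0 - 1],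
           bPatched (cB ++ [0,0]) pB (bFind s (2*((m : Int) - 1 - (t : Int))) pB (cB ++ [0,0]) 10 0 - 1)) := rfl
    have hstepA : stepA s m pB t
        = pB ++ [bFind s (2*((m : Int) - 1 - (t : Int))) pB (cellsSpec pB ++ [0,0]) 10 0 - 1] := by
      unfold stepA
      have h1 : aInner s (2*((m : Int) - 1 - (t : Int))) t 10 (pB ++ [0])
          = pB ++ [bFind s (2*((m : Int) - 1 - (t : Int))) pB (cellsSpec pB ++ [0,0]) 10 (0:Int)] := by
        have := inner_eq s (2*((m : Int) - 1 - (t : Int))) pB (by omega) 10 0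
        rwa [ih3] at this
      show (aInner s (2*((m : Int) - 1 - (t : Int))) t 10 (pB ++ [0])).set t
            ((aInner s (2*((m : Int) - 1 - (t : Int))) t 10 (pB ++ [0])).getD t 0 - 1) = _
      rw [h1]
      have hgd : (pB ++ [bFind s (2*((m : Int) - 1 - (t : Int))) pB (cellsSpec pB ++ [0,0]) 10 (0:Int)]).getD t 0
          = bFind s (2*((m : Int) - 1 - (t : Int))) pB (cellsSpec pB ++ [0,0]) 10 (0:Int) := by
        rw [← ih3]; simp
      rw [hgd, List.set_append, if_neg (by omega)]
      rw [show t - pB.length = 0 by omega]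
      rfl
    rw [ih1, hstepA, hstepB, ih2]
    refine ⟨rfl, ?_, ?_⟩
    · show bPatched (cellsSpec pB ++ [0,0]) pB _ = cellsSpec (pB ++ [_])
      rw [bPatched_cells]
    · simp [ih3]

-- ===== VERDICT (by name: the statement is the Claim_ definition above) =====
theorem dashu_sqrt_spec : Claim_equal_dashu_sqrt := by
  intro s _dom hpre
  unfold Spec_dashu_sqrt dashu_sqrt dashu_sqrt_alt
  have hlen : s.toList.length ≤ 500 := hpre
  have hm : (if s.toList.length % 2 = 1 then s.toList.length / 2 + 1 else s.toList.length / 2)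
      = s.toList.length / 2 + s.toList.length % 2 := by
    split_ifs with h1 <;> omega
  have h2m : 2 * (s.toList.length / 2 + s.toList.length % 2) ≤ 500 := by omega
  show (List.range _).foldl (stepA s.toList _) [] = ((List.range _).foldl (stepB s.toList _) ([], [])).1
  rw [hm]
  exact (outer_eq s.toList _ h2m _ le_rfl).1
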